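-- pv_equiv track=rewrite | github.com/huanghaoXcore/flagtree | third_party/iluvatar/python/test/unit/integrations/vllm/punica_lora/test_punica_ops.py | _is_nonconsecutive
-- ===== SOURCE A (Python) =====
-- def _is_nonconsecutive(mapping: list[int]) -> bool:
--     positions = {}
--     for idx, val in enumerate(mapping):
--         positions.setdefault(val, []).append(idx)
--     for pos in positions.values():
--         if len(pos) >= 2:
--             for i in range(1, len(pos)):
--                 if pos[i] - pos[i - 1] != 1:
--                     return True
--     return False
-- ===== SOURCE B (Python) =====
-- def _is_nonconsecutive(mapping: list[int]) -> bool: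
--     last = {}
--     for idx, val in enumerate(mapping):
--         if val in last and idx - last[val] != 1:
--             return True
--         last[val] = idx
--     return False
-- ===== Notes on version B (the rewrite author's own statement) =====
-- stated objective: simpler
-- what changed: Single pass keeping only the most-recently-seen index per value in a dict, returning early on the first non-consecutive repeat, instead of grouping all indices per value into lists and then scanning every group in a second pass.
import Mathlib
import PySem

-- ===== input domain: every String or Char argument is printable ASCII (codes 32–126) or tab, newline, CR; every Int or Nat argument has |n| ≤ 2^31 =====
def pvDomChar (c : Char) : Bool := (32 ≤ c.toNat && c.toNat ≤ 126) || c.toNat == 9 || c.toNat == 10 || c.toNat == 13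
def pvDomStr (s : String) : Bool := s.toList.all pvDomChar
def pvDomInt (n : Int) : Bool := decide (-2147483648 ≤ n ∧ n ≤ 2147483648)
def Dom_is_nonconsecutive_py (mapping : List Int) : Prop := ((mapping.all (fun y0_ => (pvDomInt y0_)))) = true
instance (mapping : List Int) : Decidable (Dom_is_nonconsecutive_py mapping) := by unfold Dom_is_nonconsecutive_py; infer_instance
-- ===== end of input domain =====

-- B replaces A's group-all-indices-then-scan with a single early-exit pass keeping only the last index per value (simpler; return value proved equal).

-- ===== PORT A =====
-- positions = {}; for idx, val in enumerate(mapping): positions.setdefault(val, []).append(idx)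
-- (setdefault(val, []).append(idx) = positions[val] = positions.get(val, []) + [idx], i.e. Dict.modify val [] (· ++ [idx]))
-- then: for pos in positions.values(): if len(pos) >= 2: for i in range(1, len(pos)): if pos[i] - pos[i-1] != 1: return True; return False
def is_nonconsecutive_py (mapping : List Int) : Bool :=
  let positions : PySem.Dict Int (List Int) :=
    (PySem.List.enumerate mapping).foldl
      (fun d p => d.modify p.2 [] (fun l => l ++ [p.1])) PySem.Dict.empty
  positions.values.any (fun pos =>
    decide (2 ≤ pos.length) &&
    (PySem.List.pyRange 1 (pos.length : Int) 1).any (fun i =>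
      decide (PySem.List.pyGetD pos i 0 - PySem.List.pyGetD pos (i - 1) 0 ≠ 1)))

-- ===== PORT B =====
-- the loop body of B: dict `last` maps a value to its most recent index; early return True on a gap ≠ 1
def altGo : List (Int × Int) → PySem.Dict Int Int → Bool
  | [], _ => false
  | (idx, val) :: rest, last =>
    match last.get? val with
    | some l => if idx - l ≠ 1 then true else altGo rest (last.insert val idx)
    | none => altGo rest (last.insert val idx)

def is_nonconsecutive_py_alt (mapping : List Int) : Bool :=
  altGo (PySem.List.enumerate mapping) PySem.Dict.empty

-- ===== PRECONDITION & SPEC =====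
def Spec_is_nonconsecutive_py (mapping : List Int) (out : Bool) : Prop := out = is_nonconsecutive_py_alt mapping
instance (mapping : List Int) (out : Bool) : Decidable (Spec_is_nonconsecutive_py mapping out) := by unfold Spec_is_nonconsecutive_py; infer_instance

-- ===== CLAIM (what is proved, stated in full; the proofs are below) =====
def Claim_equal_is_nonconsecutive_py : Prop := ∀ (mapping : List Int), Dom_is_nonconsecutive_py mapping → Spec_is_nonconsecutive_py mapping (is_nonconsecutive_py mapping)

-- ===== LEMMAS AND PROOFS =====

-- occF v m s = the indices (starting at s) at which v occurs in m, in increasing order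
def occF (v : Int) (m : List Int) (s : Int) : List Int :=
  ((PySem.List.enumerate m s).filter (fun p => p.2 == v)).map (·.1)

-- adjBad l = some adjacent pair of l differs by ≠ 1
def adjBad : List Int → Bool
  | a :: b :: t => decide (b - a ≠ 1) || adjBad (b :: t)
  | _ => false

-- the common specification both ports are reduced to
def specB (m : List Int) : Bool := m.any (fun v => adjBad (occF v m 0))

lemma occF_nil (v s : Int) : occF v [] s = [] := rfl

lemma occF_cons (v x : Int) (m : List Int) (s : Int) :
    occF v (x :: m) s = (if x == v then [s] else []) ++ occF v m (s + 1) := by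
  simp [occF, PySem.List.enumerate_cons]
  by_cases h : x = v <;> simp [h]

lemma occF_append (v : Int) (p q : List Int) (s : Int) :
    occF v (p ++ q) s = occF v p s ++ occF v q (s + p.length) := by
  simp [occF, PySem.List.enumerate_append]

lemma mem_of_occF_ne_nil (v : Int) (m : List Int) (s : Int) (h : occF v m s ≠ []) : v ∈ m := by
  induction m generalizing s with
  | nil => simp [occF_nil] at h
  | cons x t ih =>
    rw [occF_cons] at h
    by_cases hx : x = v
    · simp [hx]
    · simp [hx] at h
      exact List.mem_cons_of_mem _ (ih (s + 1) h)

lemma adjBad_ne_nil {l : List Int} (h : adjBad l = true) : l ≠ [] := by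
  cases l <;> simp_all [adjBad]

lemma adjBad_append_singleton (l : List Int) (n : Int) :
    adjBad (l ++ [n]) =
      (adjBad l || match l.getLast? with
        | some a => decide (n - a ≠ 1)
        | none => false) := by
  induction l with
  | nil => simp [adjBad]
  | cons a t ih =>
    cases t with
    | nil => simp [adjBad]
    | cons b r =>
      simp only [List.cons_append, adjBad, List.getLast?_cons_cons, Bool.or_assoc]
      rw [← List.cons_append, ih]

lemma adjBad_append_left {l : List Int} (t : List Int) (h : adjBad l = true) :
    adjBad (l ++ t) = true := by
  induction l with
  | nil => simp [adjBad] at h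
  | cons a r ih =>
    cases r with
    | nil => simp [adjBad] at h
    | cons b u =>
      simp only [adjBad, Bool.or_eq_true] at h
      rcases h with h | h
      · simp [adjBad, h]
      · simp only [List.cons_append, adjBad]
        rw [← List.cons_append, ih h, Bool.or_true]

lemma adjBad_iff (l : List Int) :
    adjBad l = true ↔ ∃ j, ∃ h : j + 1 < l.length, l[j + 1] - l[j] ≠ 1 := by
  induction l with
  | nil => simp [adjBad]
  | cons a t ih =>
    cases t with
    | nil => simp [adjBad]
    | cons b r =>
      simp only [adjBad, Bool.or_eq_true, decide_eq_true_eq, ih]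
      constructor
      · rintro (h | ⟨j, hj, hne⟩)
        · exact ⟨0, by simp, by simpa using h⟩
        · exact ⟨j + 1, by simpa using Nat.succ_lt_succ hj, by simpa using hne⟩
      · rintro ⟨j, hj, hne⟩
        cases j with
        | zero => exact Or.inl (by simpa using hne)
        | succ j =>
          exact Or.inr ⟨j, by simpa using Nat.lt_of_succ_lt_succ hj, by simpa using hne⟩

-- A's inner check (the guarded range loop) equals adjBad
lemma innerA_eq_adjBad (pos : List Int) :
    (decide (2 ≤ pos.length) &&
      (PySem.List.pyRange 1 (pos.length : Int) 1).any (fun i =>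
        decide (PySem.List.pyGetD pos i 0 - PySem.List.pyGetD pos (i - 1) 0 ≠ 1))) = adjBad pos := by
  rw [Bool.eq_iff_iff, Bool.and_eq_true, List.any_eq_true, adjBad_iff]
  constructor
  · rintro ⟨-, i, hi, hne⟩
    rw [PySem.List.mem_pyRange_one] at hi
    obtain ⟨h1, h2⟩ := hi
    have h2n : i < (pos.length : Int) := h2
    have hnat : i.toNat < pos.length := by omega
    refine ⟨i.toNat - 1, by omega, ?_⟩
    rw [PySem.List.pyGetD_eq_getElem pos 0 (by omega) h2n,
        PySem.List.pyGetD_eq_getElem pos 0 (by omega) (by omega)] at hne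
    simp only [decide_eq_true_eq] at hne
    have e1 : i.toNat - 1 + 1 = i.toNat := by omega
    have e2 : (i - 1).toNat = i.toNat - 1 := by omega
    simp only [e1, e2] at hne ⊢
    exact hne
  · rintro ⟨j, hj, hne⟩
    refine ⟨by simp only [decide_eq_true_eq]; omega, ((j + 1 : Nat) : Int), ?_, ?_⟩
    · rw [PySem.List.mem_pyRange_one]
      constructor
      · exact_mod_cast Nat.one_le_iff_ne_zero.mpr (by omega)
      · exact_mod_cast hj
    · have hle : ((j + 1 : Nat) : Int) < (pos.length : Int) := by exact_mod_cast hj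
      rw [PySem.List.pyGetD_eq_getElem pos 0 (by positivity) hle,
          PySem.List.pyGetD_eq_getElem pos 0 (by push_cast; omega) (by push_cast; omega)]
      have e1 : ((j + 1 : Nat) : Int).toNat = j + 1 := by omega
      have e2 : (((j + 1 : Nat) : Int) - 1).toNat = j := by omega
      simp only [e1, e2, decide_eq_true_eq]
      exact hne

-- the dict A builds
def posDict (m : List Int) : PySem.Dict Int (List Int) :=
  (PySem.List.enumerate m).foldl
    (fun d p => d.modify p.2 [] (fun l => l ++ [p.1])) PySem.Dict.empty

lemma nodup_keys_posDict (m : List Int) : (posDict m).keys.Nodup := by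
  exact PySem.Dict.nodup_keys_foldl_modify_key (PySem.List.enumerate m) (fun p => p.2) []
    (fun _ p => fun l => l ++ [p.1]) PySem.Dict.empty PySem.Dict.nodup_keys_empty


lemma posDict_getD (m : List Int) (v : Int) : (posDict m).getD v [] = occF v m 0 := by
  have h : posDict m = List.foldl (fun d p => d.modify p.1 [] fun x => x ++ [p.2])
      PySem.Dict.empty ((PySem.List.enumerate m).map Prod.swap) := by
    rw [List.foldl_map]
    rfl
  rw [h, PySem.Dict.getD_foldl_modify_append]
  simp [occF, List.filter_map, Function.comp_def]

lemma posDict_keys (m : List Int) : (posDict m).keys = PySem.Set.ofList m := by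
  unfold posDict
  rw [PySem.Dict.keys_foldl_modify_key (PySem.List.enumerate m) (fun p => p.2) []
    (fun _ p => fun l => l ++ [p.1]) PySem.Dict.empty]
  rw [PySem.List.map_snd_enumerate]
  simp [PySem.Dict.keys_empty, PySem.Set.update_nil_left]

lemma any_ofList (m : List Int) (f : Int → Bool) : (PySem.Set.ofList m).any f = m.any f := by
  rw [Bool.eq_iff_iff]
  simp only [List.any_eq_true, PySem.Set.mem_ofList]

lemma A_eq_specB (m : List Int) : is_nonconsecutive_py m = specB m := by
  change ((posDict m).values.any (fun pos =>
    decide (2 ≤ pos.length) &&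
    (PySem.List.pyRange 1 (pos.length : Int) 1).any (fun i =>
      decide (PySem.List.pyGetD pos i 0 - PySem.List.pyGetD pos (i - 1) 0 ≠ 1)))) = specB m
  rw [PySem.Dict.values_eq_map_keys _ (nodup_keys_posDict m) ([] : List Int), List.any_map]
  rw [posDict_keys, any_ofList]
  unfold specB
  refine PySem.List.any_congr_mem ?_
  intro v _
  simp only [Function.comp]
  simp only [posDict_getD]
  exact innerA_eq_adjBad _

-- boundary check: value x arrives at index p.length; is the gap to its previous occurrence ≠ 1?
def bnd (x : Int) (p : List Int) : Bool :=
  match (occF x p 0).getLast? with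
  | some l => decide ((p.length : Int) - l ≠ 1)
  | none => false

lemma occF_singleton (v x s : Int) : occF v [x] s = if x == v then [s] else [] := by
  rw [occF_cons, occF_nil, List.append_nil]

lemma specB_snoc (p : List Int) (x : Int) : specB (p ++ [x]) = (specB p || bnd x p) := by
  rw [Bool.eq_iff_iff]
  simp only [specB, Bool.or_eq_true, List.any_eq_true]
  constructor
  · rintro ⟨v, hv, hbad⟩
    by_cases hx : v = x
    · subst hx
      rw [occF_append, occF_singleton] at hbad
      simp only [BEq.rfl, if_pos, zero_add] at hbad
      rw [adjBad_append_singleton] at hbad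
      rw [Bool.or_eq_true] at hbad
      rcases hbad with h | h
      · exact Or.inl ⟨v, mem_of_occF_ne_nil _ _ _ (adjBad_ne_nil h), h⟩
      · right
        unfold bnd
        cases hgl : (occF v p 0).getLast? with
        | none => rw [hgl] at h; simp at h
        | some a => rw [hgl] at h; exact h
    · left
      have hvp : v ∈ p := by
        rcases List.mem_append.mp hv with h | h
        · exact h
        · exact absurd (List.mem_singleton.mp h) hx
      refine ⟨v, hvp, ?_⟩
      rw [occF_append, occF_singleton] at hbad
      simp only [beq_iff_eq, Ne.symm hx, if_false, List.append_nil] at hbad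
      exact hbad
  · rintro (⟨v, hv, hbad⟩ | hb)
    · refine ⟨v, List.mem_append_left _ hv, ?_⟩
      rw [occF_append, occF_singleton]
      by_cases hx : x = v
      · simp only [hx, BEq.rfl, if_pos]
        rw [adjBad_append_singleton, hbad, Bool.true_or]
      · simp only [beq_iff_eq, hx, if_false, List.append_nil]
        exact hbad
    · refine ⟨x, List.mem_append_right _ (List.mem_singleton.mpr rfl), ?_⟩
      unfold bnd at hb
      cases hgl : (occF x p 0).getLast? with
      | none => rw [hgl] at hb; simp at hb
      | some a =>
        rw [hgl] at hb
        rw [occF_append, occF_singleton]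
        simp only [BEq.rfl, if_pos, zero_add]
        rw [adjBad_append_singleton, hgl, hb, Bool.or_true]

lemma specB_append_left_mono {q : List Int} (r : List Int) (h : specB q = true) :
    specB (q ++ r) = true := by
  simp only [specB, List.any_eq_true] at h ⊢
  obtain ⟨v, hv, hb⟩ := h
  refine ⟨v, List.mem_append_left _ hv, ?_⟩
  rw [occF_append]
  exact adjBad_append_left _ hb

lemma altGo_eq (rest : List Int) : ∀ (p : List Int) (last : PySem.Dict Int Int),
    specB p = false →
    (∀ v, last.get? v = (occF v p 0).getLast?) →
    altGo (PySem.List.enumerate rest (p.length : Int)) last = specB (p ++ rest) := by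
  induction rest with
  | nil =>
    intro p last hp _
    rw [PySem.List.enumerate_nil, List.append_nil]
    exact hp.symm ▸ rfl
  | cons x r ih =>
    intro p last hp hlast
    rw [PySem.List.enumerate_cons]
    have hins : ∀ v, (last.insert x (p.length : Int)).get? v = (occF v (p ++ [x]) 0).getLast? := by
      intro v
      rw [PySem.Dict.get?_insert, occF_append, occF_singleton]
      by_cases hvx : v = x
      · rw [if_pos hvx]
        simp [hvx]
      · rw [if_neg hvx, hlast v]
        simp [Ne.symm hvx]
    have hsplit : p ++ x :: r = (p ++ [x]) ++ r := by simp
    have hlen : ((p ++ [x]).length : Int) = (p.length : Int) + 1 := by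
      simp [List.length_append]
    rw [hsplit]
    show altGo (((p.length : Int), x) :: PySem.List.enumerate r ((p.length : Int) + 1)) last
        = specB ((p ++ [x]) ++ r)
    unfold altGo
    cases hg : last.get? x with
    | none =>
      have hbnd : bnd x p = false := by
        unfold bnd
        rw [← hlast x, hg]
      have hp' : specB (p ++ [x]) = false := by rw [specB_snoc, hp, hbnd]; rfl
      have := ih (p ++ [x]) (last.insert x (p.length : Int)) hp' hins
      rw [hlen] at this
      exact this
    | some l =>
      dsimp only
      by_cases hgap : (p.length : Int) - l ≠ 1
      · rw [if_pos hgap]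
        have hbnd : bnd x p = true := by
          unfold bnd
          rw [← hlast x, hg]
          simpa using hgap
        refine (specB_append_left_mono r ?_).symm
        rw [specB_snoc, hbnd, Bool.or_true]
      · rw [if_neg hgap]
        have hbnd : bnd x p = false := by
          unfold bnd
          rw [← hlast x, hg]
          simpa using hgap
        have hp' : specB (p ++ [x]) = false := by rw [specB_snoc, hp, hbnd]; rfl
        have := ih (p ++ [x]) (last.insert x (p.length : Int)) hp' hins
        rw [hlen] at this
        exact this

lemma B_eq_specB (m : List Int) : is_nonconsecutive_py_alt m = specB m := by
  have h := altGo_eq m [] PySem.Dict.empty rfl (fun v => by simp [PySem.Dict.get?_empty, occF_nil])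
  simpa [is_nonconsecutive_py_alt] using h

-- ===== VERDICT (by name: the statement is the Claim_ definition above) =====
theorem is_nonconsecutive_py_spec : Claim_equal_is_nonconsecutive_py := by
  intro m _
  unfold Spec_is_nonconsecutive_py
  rw [A_eq_specB, B_eq_specB]
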